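-- pv_equiv track=rewrite | github.com/encode/django-rest-framework | rest_framework/schemas.py | determine_path_prefix
-- ===== SOURCE A (Python) =====
-- def common_path(paths):
--     split_paths = [path.strip('/').split('/') for path in paths]
--     s1 = min(split_paths)
--     s2 = max(split_paths)
--     common = s1
--     for i, c in enumerate(s1):
--         if c != s2[i]:
--             common = s1[:i]
--             break
--     return '/' + '/'.join(common)
--
-- def determine_path_prefix(paths):
--     """
--     Given a list of all paths, return the common prefix which should be
--     discounted when generating a schema structure.
--
--     This will be the longest common string that does not include that last
--     component of the URL, or the last component before a path parameter.
--
--     For example: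
--
--     /api/v1/users/
--     /api/v1/users/{pk}/
--
--     The path prefix is '/api/v1/'
--     """
--     prefixes = []
--     for path in paths:
--         components = path.strip('/').split('/')
--         initial_components = []
--         for component in components:
--             if '{' in component:
--                 break
--             initial_components.append(component)
--         prefix = '/'.join(initial_components[:-1])
--         if not prefix:
--             # We can just break early in the case that there's at least
--             # one URL that doesn't have a path prefix.
--             return '/'
--         prefixes.append('/' + prefix + '/')
--     return common_path(prefixes)
-- ===== SOURCE B (Python) =====
-- def determine_path_prefix(paths):
--     # Build, for each path, the list of prefix components (everything up to
--     # the first parametrised component, minus the final component).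
--     rows = []
--     for path in paths:
--         components = path.strip('/').split('/')
--         initial_components = []
--         for component in components:
--             if '{' in component:
--                 break
--             initial_components.append(component)
--         prefix = '/'.join(initial_components[:-1])
--         if not prefix:
--             # At least one URL has no path prefix.
--             return '/'
--         rows.append(prefix.strip('/').split('/'))
--     # Fold a pairwise longest-common-prefix over all component rows.
--     common = rows[0]
--     for row in rows[1:]:
--         kept = []
--         for x, y in zip(common, row):
--             if x != y:
--                 break
--             kept.append(x)
--         common = kept
--     return '/' + '/'.join(common)
-- ===== Notes on version B (the rewrite author's own statement) =====
-- stated objective: simpler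
-- what changed: A finds the common prefix by taking the lexicographic min and max of all split prefix paths and scanning them against each other; B drops that bracketing trick and instead folds a direct pairwise longest-common-prefix (column scan via zip) over the prefix component lists.
-- outside the precondition, e.g. on determine_path_prefix([]): A raises ValueError, B raises IndexError
import Mathlib
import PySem

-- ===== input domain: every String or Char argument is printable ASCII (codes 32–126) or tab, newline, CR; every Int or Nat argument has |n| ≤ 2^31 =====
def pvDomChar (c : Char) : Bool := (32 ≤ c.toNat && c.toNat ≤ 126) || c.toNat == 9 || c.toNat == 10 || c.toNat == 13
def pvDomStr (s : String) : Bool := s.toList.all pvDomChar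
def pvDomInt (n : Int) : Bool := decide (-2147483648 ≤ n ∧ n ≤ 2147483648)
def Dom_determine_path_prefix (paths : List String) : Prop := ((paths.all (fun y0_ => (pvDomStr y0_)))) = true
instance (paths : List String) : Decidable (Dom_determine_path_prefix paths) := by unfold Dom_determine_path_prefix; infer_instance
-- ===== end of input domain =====

-- B replaces A's lexicographic-min/max bracketing in common_path by a direct fold of a
-- pairwise longest-common-prefix over the prefix component lists (objective: simpler).
-- Both Pythons raise on paths = [] (A: ValueError from min([]), B: IndexError from rows[0]); Pre_ excludes it.

-- ===== PORT A =====

-- shared first phase (identical source text in both Pythons): components before the first '{',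
-- then '/'.join(initial_components[:-1])
def pvInitialComponents : List String → List String
  | [] => []
  | c :: rest => if PySem.Str.isIn "{" c then [] else c :: pvInitialComponents rest

-- path.strip('/').split('/') ; sep "/" is a nonempty literal, so Str.split? is always `some`
def pvSplitSlash (s : String) : List String :=
  (PySem.Str.split? (PySem.Str.stripChars s "/") "/").getD []

def pvJoinedPrefix (path : String) : String :=
  PySem.Str.join "/" (PySem.List.slice (pvInitialComponents (pvSplitSlash path)) none (some (-1)))

-- the 'for i, c in enumerate(s1): if c != s2[i]: common = s1[:i]; break' loop of common_path;
-- s2[i] is read with default "" — under Pre_ the index is always in range (s1 = min ≤ s2 = max), see scan lemmas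
def pvCommonScan (s1 s2 : List String) : List (Int × String) → List String
  | [] => s1
  | (i, c) :: rest =>
      if c ≠ PySem.List.pyGetD s2 i "" then PySem.List.slice s1 none (some i)
      else pvCommonScan s1 s2 rest

-- split_paths = [path.strip('/').split('/') for path in paths], written inline at both uses
def pvCommonPath (paths : List String) : String :=
  match PySem.List.min? (paths.map pvSplitSlash) (fun x => x),
        PySem.List.max? (paths.map pvSplitSlash) (fun x => x) with
  | some s1, some s2 => "/" ++ PySem.Str.join "/" (pvCommonScan s1 s2 (PySem.List.enumerate s1 0))
  | _, _ => "/"   -- min([]) raises ValueError: only for paths = [], excluded by Pre_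

-- the prefix-building loop with its early 'return /' (none = that early return)
def pvBuildPrefixes : List String → Option (List String)
  | [] => some []
  | p :: rest =>
      let pre := pvJoinedPrefix p
      if pre = "" then none
      else Option.map (fun ps => ("/" ++ pre ++ "/") :: ps) (pvBuildPrefixes rest)

def determine_path_prefix (paths : List String) : String :=
  match pvBuildPrefixes paths with
  | none => "/"
  | some prefixes => pvCommonPath prefixes

-- ===== PORT B =====

-- the 'for x, y in zip(common, row): if x != y: break; kept.append(x)' loop
def pvCpre : List String → List String → List String
  | x :: xs, y :: ys => if x = y then x :: pvCpre xs ys else []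
  | _, _ => []

-- B's building loop: same early 'return /', but it stores the split component rows directly
def pvBuildRows : List String → Option (List (List String))
  | [] => some []
  | p :: rest =>
      let pre := pvJoinedPrefix p
      if pre = "" then none
      else Option.map (fun rs => pvSplitSlash pre :: rs) (pvBuildRows rest)

def determine_path_prefix_alt (paths : List String) : String :=
  match pvBuildRows paths with
  | none => "/"
  | some [] => "/"   -- rows[0] raises IndexError: only for paths = [], excluded by Pre_
  | some (r0 :: rest) => "/" ++ PySem.Str.join "/" (rest.foldl pvCpre r0)

-- ===== PRECONDITION & SPEC =====
-- On paths = [] both programs raise (A: ValueError from min([]), B: IndexError from rows[0]).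
def Pre_determine_path_prefix (paths : List String) : Prop := paths ≠ []
instance (paths : List String) : Decidable (Pre_determine_path_prefix paths) := by unfold Pre_determine_path_prefix; infer_instance
def pvWitness_determine_path_prefix : List String := ["/api/v1/users/", "/api/v1/users/{pk}/"]

def Spec_determine_path_prefix (paths : List String) (out : String) : Prop := out = determine_path_prefix_alt paths
instance (paths : List String) (out : String) : Decidable (Spec_determine_path_prefix paths out) := by unfold Spec_determine_path_prefix; infer_instance

-- ===== CLAIM (what is proved, stated in full; the proofs are below) =====
def Claim_equal_determine_path_prefix : Prop := ∀ (paths : List String), Dom_determine_path_prefix paths → Pre_determine_path_prefix paths → Spec_determine_path_prefix paths (determine_path_prefix paths)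

-- ===== LEMMAS AND PROOFS =====

-- '/'-stripping ignores the decoration '/…/' A wraps its prefixes in
lemma dropWhile_slash_wrap (cs : List Char) :
    List.dropWhile (fun c => decide (c = '/')) (List.dropWhile (fun c => decide (c = '/')) (cs ++ ['/'])).reverse =
    List.dropWhile (fun c => decide (c = '/')) (List.dropWhile (fun c => decide (c = '/')) cs).reverse := by
  induction cs with
  | nil => simp
  | cons c cs ih =>
      by_cases h : c = '/'
      · simpa [h] using ih
      · simp [h]

lemma stripChars_wrap (q : String) :
    PySem.Str.stripChars ("/" ++ q ++ "/") "/" = PySem.Str.stripChars q "/" := by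
  simp [PySem.Str.stripChars, PySem.Chars.stripChars, dropWhile_slash_wrap]

lemma splitSlash_wrap (q : String) : pvSplitSlash ("/" ++ q ++ "/") = pvSplitSlash q := by
  simp [pvSplitSlash, stripChars_wrap]

-- B's rows are exactly A's prefixes, split
lemma buildRows_eq (paths : List String) :
    pvBuildRows paths = Option.map (List.map pvSplitSlash) (pvBuildPrefixes paths) := by
  induction paths with
  | nil => rfl
  | cons p rest ih =>
      simp only [pvBuildRows, pvBuildPrefixes]
      by_cases h : pvJoinedPrefix p = ""
      · simp [h]
      · cases hb : pvBuildPrefixes rest <;> simp [h, ih, hb, splitSlash_wrap]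

-- pvCpre is the longest common prefix of its two arguments
lemma cpre_prefix_left : ∀ a b : List String, pvCpre a b <+: a
  | [], b => by simp [pvCpre]
  | x :: xs, [] => by simp [pvCpre]
  | x :: xs, y :: ys => by
      by_cases h : x = y
      · simpa [pvCpre, h] using cpre_prefix_left xs ys
      · simp [pvCpre, h]

lemma cpre_prefix_right : ∀ a b : List String, pvCpre a b <+: b
  | [], b => by simp [pvCpre]
  | x :: xs, [] => by simp [pvCpre]
  | x :: xs, y :: ys => by
      by_cases h : x = y
      · simpa [pvCpre, h] using cpre_prefix_right xs ys
      · simp [pvCpre, h]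

lemma cpre_of_prefix_both : ∀ (p a b : List String), p <+: a → p <+: b → p <+: pvCpre a b
  | [], _, _, _, _ => by simp
  | z :: p, a, b, ha, hb => by
      obtain ⟨ta, rfl⟩ := ha
      obtain ⟨tb, hb'⟩ := hb
      cases b with
      | nil => simp at hb'
      | cons y ys =>
          obtain ⟨rfl, htail⟩ : z = y ∧ p ++ tb = ys := by
            constructor <;> [skip; skip] <;> injection hb'
          simp only [List.cons_append] at *
          have : p <+: pvCpre (p ++ ta) ys :=
            cpre_of_prefix_both p (p ++ ta) ys ⟨ta, rfl⟩ ⟨tb, htail⟩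
          simpa [pvCpre] using this

-- fold of pvCpre: a common prefix of every row …
lemma fold_cpre_prefix_acc : ∀ (l : List (List String)) (acc : List String), l.foldl pvCpre acc <+: acc
  | [], acc => by simp
  | r :: l, acc => by
      simpa using (fold_cpre_prefix_acc l (pvCpre acc r)).trans (cpre_prefix_left acc r)

lemma fold_cpre_prefix_mem : ∀ (l : List (List String)) (acc r : List String), r ∈ l → l.foldl pvCpre acc <+: r
  | [], _, _, h => by simp at h
  | r' :: l, acc, r, h => by
      rcases List.mem_cons.mp h with rfl | h
      · simpa using (fold_cpre_prefix_acc l (pvCpre acc r)).trans (cpre_prefix_right acc r)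
      · simpa using fold_cpre_prefix_mem l (pvCpre acc r') r h

-- … and the longest one
lemma fold_cpre_greatest : ∀ (l : List (List String)) (acc p : List String),
    p <+: acc → (∀ r ∈ l, p <+: r) → p <+: l.foldl pvCpre acc
  | [], acc, p, hacc, _ => by simpa using hacc
  | r :: l, acc, p, hacc, hl => by
      simp only [List.foldl_cons]
      exact fold_cpre_greatest l (pvCpre acc r) p
        (cpre_of_prefix_both p acc r hacc (hl r (List.mem_cons_self)))
        (fun r' h => hl r' (List.mem_cons_of_mem _ h))

-- a common prefix of the lexicographic min and max is a prefix of everything in between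
lemma prefix_of_between : ∀ (p a b r : List String), p <+: a → p <+: b → a ≤ r → r ≤ b → p <+: r
  | [], _, _, _, _, _, _, _ => by simp
  | z :: p, a, b, r, ha, hb, har, hrb => by
      obtain ⟨ta, rfl⟩ := ha
      obtain ⟨tb, rfl⟩ := hb
      cases r with
      | nil =>
          exfalso
          rcases lt_or_eq_of_le har with h | h
          · cases h
          · simp at h
      | cons y ys =>
          have h1 : z < y ∨ (z = y ∧ (p ++ ta : List String) ≤ ys) := by
            rcases lt_or_eq_of_le har with h | h
            · cases h with
              | cons h => exact Or.inr ⟨rfl, le_of_lt h⟩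
              | rel h => exact Or.inl h
            · injection h with h1 h2; subst h1; subst h2; exact Or.inr ⟨rfl, le_refl _⟩
          have h2 : y < z ∨ (y = z ∧ (ys : List String) ≤ p ++ tb) := by
            rcases lt_or_eq_of_le hrb with h | h
            · cases h with
              | cons h => exact Or.inr ⟨rfl, le_of_lt h⟩
              | rel h => exact Or.inl h
            · injection h with h1 h2; subst h1; subst h2; exact Or.inr ⟨rfl, le_refl _⟩
          rcases h1 with h1 | ⟨rfl, h1⟩
          · rcases h2 with h2 | ⟨rfl, _⟩
            · exact absurd (h1.trans h2) (lt_irrefl _)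
            · exact absurd h1 (lt_irrefl _)
          · rcases h2 with h2 | ⟨_, h2⟩
            · exact absurd h2 (lt_irrefl _)
            · have := prefix_of_between p (p ++ ta) (p ++ tb) ys ⟨ta, rfl⟩ ⟨tb, rfl⟩ h1 h2
              simpa using this

-- A's enumerate scan against the max computes exactly pvCpre of the two lists
lemma scan_go : ∀ (s1 s2 pre : List String), s1 ≤ s2 →
    pvCommonScan (pre ++ s1) (pre ++ s2) (PySem.List.enumerate s1 (pre.length : Int)) = pre ++ pvCpre s1 s2
  | [], s2, pre, _ => by simp [pvCommonScan, pvCpre, PySem.List.enumerate]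
  | x :: xs, s2, pre, h => by
      cases s2 with
      | nil =>
          exfalso
          rcases lt_or_eq_of_le h with h | h
          · cases h
          · simp at h
      | cons y ys =>
          have hy : PySem.List.pyGetD (pre ++ y :: ys) (pre.length : Int) "" = y := by
            rw [PySem.List.pyGetD_natCast]
            simp
          rw [PySem.List.enumerate_cons]
          by_cases hxy : x = y
          · subst hxy
            have hle : (xs : List String) ≤ ys := by
              rcases lt_or_eq_of_le h with h | h
              · cases h with
                | cons h => exact le_of_lt h
                | rel h => exact absurd h (lt_irrefl _)
              · injection h with _ h2; subst h2; exact le_refl _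
            have := scan_go xs ys (pre ++ [x]) hle
            simp only [List.append_assoc, List.cons_append, List.nil_append,
              List.length_append, List.length_cons, List.length_nil] at this
            rw [pvCommonScan, if_neg (by simp [hy])]
            simpa [pvCpre, List.append_assoc] using this
          · rw [pvCommonScan, if_pos (by simp [hy, hxy])]
            rw [PySem.List.slice_to _ (Int.natCast_nonneg _)]
            simp [pvCpre, hxy]

-- specification of the port's min?/max? (first extremal element), proved at the instance the port uses
lemma min?_step (x0 x : List String) (xs : List (List String)) :
    PySem.List.min? (x0 :: x :: xs) (fun y => y) = PySem.List.min? ((if x < x0 then x else x0) :: xs) (fun y => y) := by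
  by_cases h : x < x0 <;> simp [PySem.List.min?, h]

lemma max?_step (x0 x : List String) (xs : List (List String)) :
    PySem.List.max? (x0 :: x :: xs) (fun y => y) = PySem.List.max? ((if x0 < x then x else x0) :: xs) (fun y => y) := by
  by_cases h : x0 < x <;> simp [PySem.List.max?, h]

lemma min?_spec : ∀ (xs : List (List String)) (x0 : List String),
    ∃ m, PySem.List.min? (x0 :: xs) (fun y => y) = some m
      ∧ m ∈ x0 :: xs ∧ ∀ y ∈ x0 :: xs, m ≤ y
  | [], x0 => ⟨x0, by simp [PySem.List.min?], List.mem_cons_self, by simp⟩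
  | x :: xs, x0 => by
      obtain ⟨m, hm, hmem, hall⟩ := min?_spec xs (if x < x0 then x else x0)
      refine ⟨m, (min?_step x0 x xs).trans hm, ?_, ?_⟩
      · rcases List.mem_cons.mp hmem with rfl | hmem
        · by_cases h : x < x0 <;> simp [h]
        · exact List.mem_cons_of_mem _ (List.mem_cons_of_mem _ hmem)
      · have hhead : m ≤ if x < x0 then x else x0 := hall _ List.mem_cons_self
        intro y hy
        rcases List.mem_cons.mp hy with rfl | hy
        · by_cases h : x < y
          · exact le_trans (by simpa [h] using hhead) (le_of_lt h)
          · simpa [h] using hhead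
        · rcases List.mem_cons.mp hy with rfl | hy
          · by_cases h : y < x0
            · simpa [h] using hhead
            · exact le_trans (by simpa [h] using hhead) (not_lt.mp h)
          · exact hall y (List.mem_cons_of_mem _ hy)

lemma max?_spec : ∀ (xs : List (List String)) (x0 : List String),
    ∃ m, PySem.List.max? (x0 :: xs) (fun y => y) = some m
      ∧ m ∈ x0 :: xs ∧ ∀ y ∈ x0 :: xs, y ≤ m
  | [], x0 => ⟨x0, by simp [PySem.List.max?], List.mem_cons_self, by simp⟩
  | x :: xs, x0 => by
      obtain ⟨m, hm, hmem, hall⟩ := max?_spec xs (if x0 < x then x else x0)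
      refine ⟨m, (max?_step x0 x xs).trans hm, ?_, ?_⟩
      · rcases List.mem_cons.mp hmem with rfl | hmem
        · by_cases h : x0 < x <;> simp [h]
        · exact List.mem_cons_of_mem _ (List.mem_cons_of_mem _ hmem)
      · have hhead : (if x0 < x then x else x0) ≤ m := hall _ List.mem_cons_self
        intro y hy
        rcases List.mem_cons.mp hy with rfl | hy
        · by_cases h : y < x
          · exact le_trans (le_of_lt h) (by simpa [h] using hhead)
          · simpa [h] using hhead
        · rcases List.mem_cons.mp hy with rfl | hy
          · by_cases h : x0 < y
            · simpa [h] using hhead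
            · exact le_trans (not_lt.mp h) (by simpa [h] using hhead)
          · exact hall y (List.mem_cons_of_mem _ hy)

-- A's whole common-prefix machinery equals B's fold
lemma scan_eq_fold (r0 : List String) (rest : List (List String)) (s1 s2 : List String)
    (hs1 : s1 ∈ r0 :: rest) (hmin : ∀ y ∈ r0 :: rest, s1 ≤ y)
    (hs2 : s2 ∈ r0 :: rest) (hmax : ∀ y ∈ r0 :: rest, y ≤ s2) :
    pvCommonScan s1 s2 (PySem.List.enumerate s1 0) = rest.foldl pvCpre r0 := by
  have h12 : s1 ≤ s2 := hmin s2 hs2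
  have hscan : pvCommonScan s1 s2 (PySem.List.enumerate s1 0) = pvCpre s1 s2 := by
    simpa using scan_go s1 s2 [] h12
  rw [hscan]
  have hfold := fold_cpre_greatest rest r0 (pvCpre s1 s2)
    (prefix_of_between (pvCpre s1 s2) s1 s2 r0 (cpre_prefix_left s1 s2) (cpre_prefix_right s1 s2)
      (hmin r0 (List.mem_cons_self)) (hmax r0 (List.mem_cons_self)))
    (fun r h => prefix_of_between (pvCpre s1 s2) s1 s2 r (cpre_prefix_left s1 s2)
      (cpre_prefix_right s1 s2) (hmin r (List.mem_cons_of_mem _ h)) (hmax r (List.mem_cons_of_mem _ h)))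
  have hall : ∀ r ∈ r0 :: rest, rest.foldl pvCpre r0 <+: r := by
    intro r hr
    rcases List.mem_cons.mp hr with rfl | hr
    · exact fold_cpre_prefix_acc rest r
    · exact fold_cpre_prefix_mem rest r0 r hr
  have hback : rest.foldl pvCpre r0 <+: pvCpre s1 s2 :=
    cpre_of_prefix_both _ s1 s2 (hall s1 hs1) (hall s2 hs2)
  exact hback.eq_of_length (le_antisymm hback.length_le hfold.length_le) |>.symm

-- ===== VERDICT (by name: the statement is the Claim_ definition above) =====
theorem determine_path_prefix_spec : Claim_equal_determine_path_prefix := by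
  intro paths _ hpre
  unfold Spec_determine_path_prefix determine_path_prefix determine_path_prefix_alt
  rw [buildRows_eq]
  cases hb : pvBuildPrefixes paths with
  | none => rfl
  | some prefixes =>
      cases prefixes with
      | nil =>
          exfalso
          cases paths with
          | nil => exact hpre rfl
          | cons p ps =>
              simp only [pvBuildPrefixes] at hb
              by_cases h : pvJoinedPrefix p = ""
              · simp [h] at hb
              · rw [if_neg h] at hb
                cases pvBuildPrefixes ps <;> simp at hb
      | cons p0 ps =>
          simp only [Option.map_some, List.map_cons]
          obtain ⟨s1, hmin, hs1, hmin_all⟩ := min?_spec (ps.map pvSplitSlash) (pvSplitSlash p0)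
          obtain ⟨s2, hmax, hs2, hmax_all⟩ := max?_spec (ps.map pvSplitSlash) (pvSplitSlash p0)
          unfold pvCommonPath
          simp only [List.map_cons]
          rw [hmin, hmax]
          show "/" ++ PySem.Str.join "/" (pvCommonScan s1 s2 (PySem.List.enumerate s1 0)) = _
          rw [scan_eq_fold (pvSplitSlash p0) (ps.map pvSplitSlash) s1 s2 hs1 hmin_all hs2 hmax_all]
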